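-- pv_equiv track=rewrite | github.com/eduabdala/tool-flutter-app | lib/material/test/libraries/api/pyserialperto/src/Logger.py | convert_bytes_to_ascii
-- ===== SOURCE A (Python) =====
-- def convert_bytes_to_ascii(bytes_to_convert):
--     converted = []
--     for byte_to_convert in bytes_to_convert:
--         if (byte_to_convert > 32 and byte_to_convert < 127):
--             converted.append(chr(byte_to_convert))
--         else:
--             converted.append(".")
--     return ''.join(converted)
-- ===== SOURCE B (Python) =====
-- def convert_bytes_to_ascii(bytes_to_convert):
--     if not bytes_to_convert:
--         return ''
--     if len(bytes_to_convert) == 1: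
--         b = bytes_to_convert[0]
--         return chr(b) if 32 < b < 127 else '.'
--     m = len(bytes_to_convert) // 2
--     return (convert_bytes_to_ascii(bytes_to_convert[:m])
--             + convert_bytes_to_ascii(bytes_to_convert[m:]))
-- ===== Notes on version B (the rewrite author's own statement) =====
-- stated objective: alternative
-- what changed: Replaces A's linear append-accumulator loop with a divide-and-conquer recursion: split the list at the midpoint, convert each half recursively, and concatenate the two resulting strings.
import Mathlib
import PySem

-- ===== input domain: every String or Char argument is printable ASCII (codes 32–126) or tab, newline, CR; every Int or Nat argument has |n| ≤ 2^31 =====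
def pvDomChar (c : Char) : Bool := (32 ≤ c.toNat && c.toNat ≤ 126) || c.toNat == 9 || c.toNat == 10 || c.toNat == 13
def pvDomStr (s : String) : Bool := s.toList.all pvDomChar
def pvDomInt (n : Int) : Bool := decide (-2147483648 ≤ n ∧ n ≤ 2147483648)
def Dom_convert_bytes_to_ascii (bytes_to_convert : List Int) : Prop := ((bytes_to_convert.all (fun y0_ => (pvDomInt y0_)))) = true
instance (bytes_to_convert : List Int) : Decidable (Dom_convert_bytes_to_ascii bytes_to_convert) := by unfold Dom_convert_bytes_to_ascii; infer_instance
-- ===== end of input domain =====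

-- B replaces A's linear append-accumulator loop with a divide-and-conquer recursion
-- (split at the midpoint, convert each half, concatenate): an alternative decomposition, not faster.

-- ===== PORT A =====
def convert_bytes_to_ascii (bytes_to_convert : List Int) : String :=
  String.mk (bytes_to_convert.foldl
    (fun converted b => converted ++ [if 32 < b ∧ b < 127 then Char.ofNat b.toNat else '.']) [])

-- ===== PORT B =====
-- Source B's recursion, on the List Char representation of the strings it builds and concatenates
def pvAltChars (bs : List Int) : List Char :=
  match bs with
  | [] => []
  | [b] => [if 32 < b ∧ b < 127 then Char.ofNat b.toNat else '.']
  | b1 :: b2 :: rest =>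
    let m := (b1 :: b2 :: rest).length / 2
    pvAltChars ((b1 :: b2 :: rest).take m) ++ pvAltChars ((b1 :: b2 :: rest).drop m)
termination_by bs.length
decreasing_by
  · simp [List.length_take]; omega
  · simp; omega

def convert_bytes_to_ascii_alt (bytes_to_convert : List Int) : String :=
  String.mk (pvAltChars bytes_to_convert)

-- ===== PRECONDITION & SPEC =====
def Spec_convert_bytes_to_ascii (bytes_to_convert : List Int) (out : String) : Prop := out = convert_bytes_to_ascii_alt bytes_to_convert
instance (bytes_to_convert : List Int) (out : String) : Decidable (Spec_convert_bytes_to_ascii bytes_to_convert out) := by unfold Spec_convert_bytes_to_ascii; infer_instance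

-- ===== CLAIM (what is proved, stated in full; the proofs are below) =====
def Claim_equal_convert_bytes_to_ascii : Prop := ∀ (bytes_to_convert : List Int), Dom_convert_bytes_to_ascii bytes_to_convert → Spec_convert_bytes_to_ascii bytes_to_convert (convert_bytes_to_ascii bytes_to_convert)

-- ===== LEMMAS AND PROOFS =====
lemma pvAltChars_eq_map (bs : List Int) :
    pvAltChars bs = bs.map (fun b => if 32 < b ∧ b < 127 then Char.ofNat b.toNat else '.') := by
  induction bs using pvAltChars.induct with
  | case1 => simp [pvAltChars]
  | case2 b => simp [pvAltChars]
  | case3 b1 b2 rest m ih1 ih2 =>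
    rw [pvAltChars]
    rw [ih1, ih2, ← List.map_append, List.take_append_drop]

-- ===== VERDICT (by name: the statement is the Claim_ definition above) =====
theorem convert_bytes_to_ascii_spec : Claim_equal_convert_bytes_to_ascii := by
  intro l _
  unfold Spec_convert_bytes_to_ascii convert_bytes_to_ascii convert_bytes_to_ascii_alt
  rw [PySem.List.foldl_append_singleton_eq_map, pvAltChars_eq_map]
  rfl
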